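-- pv_equiv track=rewrite | github.com/Kingestif/competitive-programming | leetcode/find-the-width-of-columns-of-a-grid.py | findColumnWidth
-- ===== SOURCE A (Python) =====
-- from typing import List
--
-- def findColumnWidth(grid: List[List[int]]) -> List[int]:
--     newgrid = list(map(list,zip(*grid)))
--     ls = []
--     for row in newgrid:
--         maxx = max(row)
--         minn = min(row)
--         ls.append(max(len(str(maxx)), len(str(minn))))
--
--
--     return ls
-- ===== SOURCE B (Python) =====
-- from typing import List
--
-- def findColumnWidth(grid: List[List[int]]) -> List[int]:
--     if not grid:
--         return []
--     widths = [0] * len(grid[0])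
--     for row in grid:
--         widths = [max(w, len(str(cell))) for w, cell in zip(widths, row)]
--     return widths
-- ===== Notes on version B (the rewrite author's own statement) =====
-- stated objective: simpler
-- what changed: B drops A's transpose and numeric min/max trick: it makes one row-major pass over the original grid, folding each row into a running per-column maximum of the cells' string lengths via zip.
import Mathlib
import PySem

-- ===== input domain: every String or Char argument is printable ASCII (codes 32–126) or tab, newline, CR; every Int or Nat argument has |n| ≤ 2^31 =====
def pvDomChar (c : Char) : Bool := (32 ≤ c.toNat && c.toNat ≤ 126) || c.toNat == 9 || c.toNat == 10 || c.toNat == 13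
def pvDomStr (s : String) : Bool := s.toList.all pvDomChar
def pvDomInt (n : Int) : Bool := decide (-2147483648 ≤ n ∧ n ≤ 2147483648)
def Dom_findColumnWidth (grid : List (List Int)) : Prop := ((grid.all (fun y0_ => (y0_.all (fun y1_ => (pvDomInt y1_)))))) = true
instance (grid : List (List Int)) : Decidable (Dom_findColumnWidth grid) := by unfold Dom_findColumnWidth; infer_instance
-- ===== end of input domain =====

-- B replaces A's transpose + numeric min/max with one row-major pass keeping a running
-- per-column maximum of string lengths (objective: simpler).

-- ===== PORT A =====

-- len(str(x)) — shared by both Pythons, exact via PySem.Int.toChars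
def pyStrLen (x : Int) : Int := ((PySem.Int.toChars x).length : Int)

-- zip(*rows): take heads while every row is nonempty; fuel = length of the first row
-- bounds the number of columns (Python's zip stops at the shortest row).
def zipStarAux : Nat → List (List Int) → List (List Int)
  | 0, _ => []
  | f+1, rows =>
    if rows.all (fun r => !r.isEmpty) then
      (rows.map (fun r => r.headD 0)) :: zipStarAux f (rows.map List.tail)
    else []

def zipStar (rows : List (List Int)) : List (List Int) :=
  zipStarAux (rows.headD []).length rows

-- max(row)/min(row) never raise here (each row of zip(*grid) is nonempty), so .getD 0 is a dead default
def findColumnWidth (grid : List (List Int)) : List Int :=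
  (zipStar grid).foldl (fun ls row =>
    let maxx := (PySem.List.max? row id).getD 0
    let minn := (PySem.List.min? row id).getD 0
    ls ++ [max (pyStrLen maxx) (pyStrLen minn)]) []

-- ===== PORT B =====

-- [max(w, len(str(cell))) for w, cell in zip(widths, row)]
def bStep (widths row : List Int) : List Int :=
  (widths.zip row).map (fun p => max p.1 (pyStrLen p.2))

def findColumnWidth_alt (grid : List (List Int)) : List Int :=
  match grid with
  | [] => []
  | g0 :: _ => grid.foldl bStep (List.replicate g0.length 0)

-- ===== PRECONDITION & SPEC =====
def Spec_findColumnWidth (grid : List (List Int)) (out : List Int) : Prop := out = findColumnWidth_alt grid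
instance (grid : List (List Int)) (out : List Int) : Decidable (Spec_findColumnWidth grid out) := by unfold Spec_findColumnWidth; infer_instance

-- ===== CLAIM (what is proved, stated in full; the proofs are below) =====
def Claim_equal_findColumnWidth : Prop := ∀ (grid : List (List Int)), Dom_findColumnWidth grid → Spec_findColumnWidth grid (findColumnWidth grid)

-- ===== LEMMAS AND PROOFS =====

-- number of decimal digits of a natural number
def digLen (n : Nat) : Nat :=
  if n < 10 then 1 else digLen (n / 10) + 1
  decreasing_by exact Nat.div_lt_self (by omega) (by omega)

theorem digLen_pos (n : Nat) : 1 ≤ digLen n := by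
  unfold digLen; split <;> omega

theorem digLen_lt10 {n : Nat} (h : n < 10) : digLen n = 1 := by
  unfold digLen; simp [h]

theorem digLen_ge10 {n : Nat} (h : ¬ n < 10) : digLen n = digLen (n / 10) + 1 := by
  rw [digLen]; simp [h]

theorem toDigitsCore_len : ∀ (f n : Nat) (l : List Char), n < f →
    (Nat.toDigitsCore 10 f n l).length = digLen n + l.length := by
  intro f
  induction f with
  | zero => intro n l h; omega
  | succ f ih =>
    intro n l h
    rw [Nat.toDigitsCore]
    by_cases h10 : n / 10 = 0
    · simp only [h10, if_true, List.length_cons]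
      rw [digLen_lt10 (by omega)]
      omega
    · simp only [h10, if_false]
      have hlt : n / 10 < f := by
        have h1 : n / 10 < n := Nat.div_lt_self (by omega) (by omega)
        omega
      rw [ih (n / 10) _ hlt]
      rw [show digLen n = digLen (n / 10) + 1 from digLen_ge10 (by omega)]
      simp only [List.length_cons]
      omega

theorem toDigits_len (n : Nat) : (Nat.toDigits 10 n).length = digLen n := by
  rw [Nat.toDigits, toDigitsCore_len (n + 1) n [] (by omega)]
  simp

theorem digLen_mono {a b : Nat} (h : a ≤ b) : digLen a ≤ digLen b := by
  induction b using Nat.strong_induction_on generalizing a with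
  | _ b ih =>
    by_cases hb : b < 10
    · rw [digLen_lt10 hb, digLen_lt10 (by omega)]
    · rw [digLen_ge10 hb]
      by_cases ha : a < 10
      · rw [digLen_lt10 ha]
        have := digLen_pos (b / 10); omega
      · rw [digLen_ge10 ha]
        have h1 : b / 10 < b := Nat.div_lt_self (by omega) (by omega)
        have h2 : a / 10 ≤ b / 10 := Nat.div_le_div_right h
        exact Nat.succ_le_succ (ih (b / 10) h1 h2)

theorem pyStrLen_eq (x : Int) :
    pyStrLen x = if x < 0 then (digLen x.natAbs : Int) + 1 else (digLen x.toNat : Int) := by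
  unfold pyStrLen PySem.Int.toChars
  split <;> simp [toDigits_len]

theorem pyStrLen_pos (x : Int) : 1 ≤ pyStrLen x := by
  rw [pyStrLen_eq]
  have h1 := digLen_pos x.natAbs
  have h2 := digLen_pos x.toNat
  split <;> omega

theorem pyStrLen_mono_nonneg {a b : Int} (h0 : 0 ≤ a) (h : a ≤ b) : pyStrLen a ≤ pyStrLen b := by
  rw [pyStrLen_eq, pyStrLen_eq]
  have hb : ¬ b < 0 := by omega
  have ha : ¬ a < 0 := by omega
  simp [ha, hb]
  exact_mod_cast digLen_mono (by omega : a.toNat ≤ b.toNat)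

theorem pyStrLen_mono_neg {a b : Int} (h : a ≤ b) (hb : b < 0) : pyStrLen b ≤ pyStrLen a := by
  rw [pyStrLen_eq, pyStrLen_eq]
  have ha : a < 0 := by omega
  simp [ha, hb]
  exact_mod_cast digLen_mono (by omega : b.natAbs ≤ a.natAbs)

theorem foldl_max_le (t : List Int) (a b : Int) (ha : a ≤ b) (hall : ∀ y ∈ t, y ≤ b) :
    t.foldl max a ≤ b := by
  induction t generalizing a with
  | nil => exact ha
  | cons x xs ih =>
    simp only [List.foldl_cons]
    exact ih _ (max_le ha (hall x List.mem_cons_self)) (fun y hy => hall y (List.mem_cons_of_mem _ hy))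

-- A's per-column value equals the running max of string lengths over the column
theorem width_eq_foldl (col : List Int) (h : col ≠ []) :
    max (pyStrLen ((PySem.List.max? col id).getD 0)) (pyStrLen ((PySem.List.min? col id).getD 0))
      = (col.map pyStrLen).foldl max 0 := by
  obtain ⟨M, hM⟩ : ∃ M, PySem.List.max? col id = some M := by
    cases hcase : PySem.List.max? col id with
    | none => exact absurd ((PySem.List.max?_eq_none_iff col id).mp hcase) h
    | some M => exact ⟨M, rfl⟩
  obtain ⟨m, hm⟩ : ∃ m, PySem.List.min? col id = some m := by
    cases hcase : PySem.List.min? col id with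
    | none => exact absurd ((PySem.List.min?_eq_none_iff col id).mp hcase) h
    | some m => exact ⟨m, rfl⟩
  rw [hM, hm]
  simp only [Option.getD_some]
  have hMmem := PySem.List.max?_mem hM
  have hmmem := PySem.List.min?_mem hm
  have hMmax := PySem.List.max?_isMax hM
  have hmmin := PySem.List.min?_isMin hm
  apply le_antisymm
  · apply max_le
    · exact (PySem.List.le_foldl_max (col.map pyStrLen) 0).2 _ (List.mem_map_of_mem hMmem)
    · exact (PySem.List.le_foldl_max (col.map pyStrLen) 0).2 _ (List.mem_map_of_mem hmmem)
  · apply foldl_max_le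
    · have := pyStrLen_pos M; omega
    · intro y hy
      obtain ⟨x, hx, rfl⟩ := List.mem_map.mp hy
      by_cases hx0 : 0 ≤ x
      · exact le_max_of_le_left (pyStrLen_mono_nonneg hx0 (hMmax x hx))
      · exact le_max_of_le_right (pyStrLen_mono_neg (hmmin x hx) (by omega))

-- fold of min never exceeds its initial value
theorem foldl_min_le_init (gs : List (List Int)) (n : Nat) :
    gs.foldl (fun a r => min a r.length) n ≤ n := by
  induction gs generalizing n with
  | nil => exact le_rfl
  | cons r gs ih => exact le_trans (ih _) (Nat.min_le_left _ _)

theorem foldl_min_le_mem (gs : List (List Int)) (n : Nat) {r : List Int} (hr : r ∈ gs) :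
    gs.foldl (fun a r => min a r.length) n ≤ r.length := by
  induction gs generalizing n with
  | nil => cases hr
  | cons x xs ih =>
    rcases List.mem_cons.mp hr with rfl | hr
    · simp only [List.foldl_cons]
      exact le_trans (foldl_min_le_init _ _) (Nat.min_le_right _ _)
    · simp only [List.foldl_cons]
      exact ih _ hr

theorem foldl_min_pos (gs : List (List Int)) (n : Nat) (hn : 1 ≤ n)
    (hall : ∀ r ∈ gs, r ≠ []) : 1 ≤ gs.foldl (fun a r => min a r.length) n := by
  induction gs generalizing n with
  | nil => exact hn
  | cons x xs ih =>
    have hx : x ≠ [] := hall x List.mem_cons_self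
    have : 1 ≤ min n x.length := by
      have := List.length_pos_iff.mpr hx; omega
    exact ih _ this (fun r hr => hall r (List.mem_cons_of_mem _ hr))

theorem foldl_min_tail (gs : List (List Int)) (f : Nat)
    (hall : ∀ r ∈ gs, r ≠ []) :
    (gs.map List.tail).foldl (fun a r => min a r.length) f
      = gs.foldl (fun a r => min a r.length) (f + 1) - 1 := by
  induction gs generalizing f with
  | nil => simp
  | cons x xs ih =>
    have hx : 1 ≤ x.length := List.length_pos_iff.mpr (hall x List.mem_cons_self)
    simp only [List.map_cons, List.foldl_cons, List.length_tail]
    rw [ih _ (fun r hr => hall r (List.mem_cons_of_mem _ hr))]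
    have hmin : min f (x.length - 1) + 1 = min (f + 1) x.length := by omega
    rw [hmin]

theorem zipStarAux_eq : ∀ (f : Nat) (rows : List (List Int)),
    zipStarAux f rows
      = (List.range (rows.foldl (fun a r => min a r.length) f)).map
          (fun k => rows.map (fun r => r.getD k 0)) := by
  intro f
  induction f with
  | zero =>
    intro rows
    have := foldl_min_le_init rows 0
    have h0 : rows.foldl (fun a r => min a r.length) 0 = 0 := by omega
    simp [zipStarAux, h0]
  | succ f ih =>
    intro rows
    rw [zipStarAux]
    by_cases hall : rows.all (fun r => !r.isEmpty)
    · have hne : ∀ r ∈ rows, r ≠ [] := by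
        intro r hr
        have := List.all_eq_true.mp hall r hr
        simpa [List.isEmpty_iff] using this
      simp only [hall, if_true]
      rw [ih]
      rw [foldl_min_tail rows f hne]
      have hpos : 1 ≤ rows.foldl (fun a r => min a r.length) (f + 1) :=
        foldl_min_pos rows (f + 1) (by omega) hne
      obtain ⟨m, hmeq⟩ : ∃ m, rows.foldl (fun a r => min a r.length) (f + 1) = m + 1 :=
        ⟨_, (Nat.succ_pred_eq_of_pos hpos).symm⟩
      rw [hmeq]
      simp only [Nat.add_sub_cancel]
      rw [List.range_succ_eq_map]
      simp only [List.map_cons, List.map_map]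
      congr 1
      · apply List.map_congr_left
        intro r _
        cases r <;> rfl
      · apply List.map_congr_left
        intro k _
        simp only [Function.comp]
        apply List.map_congr_left
        intro r _
        cases r <;> rfl

    · simp only [hall]
      have : ∃ r ∈ rows, r = [] := by
        rcases List.all_eq_false.mp (Bool.eq_false_iff.mpr hall) with ⟨r, hr, hrf⟩
        exact ⟨r, hr, by simpa [List.isEmpty_iff] using hrf⟩
      obtain ⟨r, hr, rfl⟩ := this
      have := foldl_min_le_mem rows (f + 1) hr
      have h0 : rows.foldl (fun a r => min a r.length) (f + 1) = 0 := by
        simpa using this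
      simp [h0]

theorem length_bStep (ws r : List Int) : (bStep ws r).length = min ws.length r.length := by
  simp [bStep]

theorem bStep_getD (ws r : List Int) (k : Nat) (h1 : k < ws.length) (h2 : k < r.length) :
    (bStep ws r).getD k 0 = max (ws.getD k 0) (pyStrLen (r.getD k 0)) := by
  have hk : k < (bStep ws r).length := by rw [length_bStep]; omega
  rw [List.getD_eq_getElem _ _ hk, List.getD_eq_getElem _ _ h1, List.getD_eq_getElem _ _ h2]
  simp [bStep]

theorem lenB (gs : List (List Int)) : ∀ ws : List Int,
    (gs.foldl bStep ws).length = gs.foldl (fun a r => min a r.length) ws.length := by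
  induction gs with
  | nil => intro ws; rfl
  | cons r gs ih =>
    intro ws
    simp only [List.foldl_cons]
    rw [ih, length_bStep]

theorem getB (gs : List (List Int)) : ∀ (ws : List Int) (k : Nat),
    k < gs.foldl (fun a r => min a r.length) ws.length →
    (gs.foldl bStep ws).getD k 0
      = gs.foldl (fun a r => max a (pyStrLen (r.getD k 0))) (ws.getD k 0) := by
  induction gs with
  | nil => intro ws k _; rfl
  | cons r gs ih =>
    intro ws k hk
    simp only [List.foldl_cons] at hk ⊢
    have hle : gs.foldl (fun a r => min a r.length) (min ws.length r.length)
        ≤ min ws.length r.length := foldl_min_le_init _ _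
    have h1 : k < ws.length := by omega
    have h2 : k < r.length := by omega
    rw [ih (bStep ws r) k (by rw [length_bStep]; exact hk), bStep_getD ws r k h1 h2]

theorem replicate_getD (n k : Nat) : (List.replicate n (0:Int)).getD k 0 = 0 := by
  by_cases h : k < n
  · exact List.getD_replicate _ h
  · rw [List.getD_eq_default]
    simpa using by omega

-- ===== VERDICT (by name: the statement is the Claim_ definition above) =====
theorem findColumnWidth_spec : Claim_equal_findColumnWidth := by
  intro grid _
  unfold Spec_findColumnWidth
  cases grid with
  | nil => rfl
  | cons g0 gs =>
    unfold findColumnWidth findColumnWidth_alt zipStar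
    have hfix : (fun (ls row : List Int) =>
        let maxx := (PySem.List.max? row id).getD 0
        let minn := (PySem.List.min? row id).getD 0
        ls ++ [max (pyStrLen maxx) (pyStrLen minn)])
      = (fun (ls row : List Int) =>
          ls ++ [(fun row => max (pyStrLen ((PySem.List.max? row id).getD 0))
                               (pyStrLen ((PySem.List.min? row id).getD 0))) row]) := rfl
    rw [hfix, PySem.List.foldl_append_singleton_eq_map]
    simp only [List.nil_append, List.headD_cons]
    rw [zipStarAux_eq]
    apply List.ext_getElem
    · rw [lenB]
      simp
    · intro k hk1 hk2
      simp only [List.getElem_map, List.getElem_range]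
      have hkm : k < (g0 :: gs).foldl (fun a r => min a r.length) g0.length := by
        simpa using hk1
      have hkm' : k < (g0 :: gs).foldl (fun a r => min a r.length)
          (List.replicate g0.length (0:Int)).length := by
        simpa using hkm
      rw [← List.getD_eq_getElem _ 0 hk2, getB _ _ _ hkm', replicate_getD]
      rw [width_eq_foldl _ (by simp)]
      rw [List.foldl_map, List.foldl_map]
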